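-- pv_equiv track=rewrite | github.com/kunal0011/myWorksSpace | python/src/Amazon/849maxDistancetoclosestperson.py | visualize_seats
-- ===== SOURCE A (Python) =====
-- from typing import List
--
-- def visualize_seats(seats: List[int], chosen_pos: int = -1) -> str:
--     """Create a visual representation of seats"""
--     result = ""
--     for i, seat in enumerate(seats):
--         if i == chosen_pos:
--             result += "X"  # Position to sit
--         elif seat == 1:
--             result += "P"  # Person
--         else:
--             result += "_"  # Empty seat
--     return result
-- ===== SOURCE B (Python) =====
-- def visualize_seats(seats, chosen_pos=-1):
--     base = ''.join('P' if s == 1 else '_' for s in seats)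
--     if 0 <= chosen_pos < len(seats):
--         return base[:chosen_pos] + 'X' + base[chosen_pos + 1:]
--     return base
-- ===== Notes on version B (the rewrite author's own statement) =====
-- stated objective: simpler
-- what changed: B renders all seats in one join and then patches the single chosen position by slicing, instead of branching on chosen_pos inside the rendering loop.
import Mathlib
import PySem

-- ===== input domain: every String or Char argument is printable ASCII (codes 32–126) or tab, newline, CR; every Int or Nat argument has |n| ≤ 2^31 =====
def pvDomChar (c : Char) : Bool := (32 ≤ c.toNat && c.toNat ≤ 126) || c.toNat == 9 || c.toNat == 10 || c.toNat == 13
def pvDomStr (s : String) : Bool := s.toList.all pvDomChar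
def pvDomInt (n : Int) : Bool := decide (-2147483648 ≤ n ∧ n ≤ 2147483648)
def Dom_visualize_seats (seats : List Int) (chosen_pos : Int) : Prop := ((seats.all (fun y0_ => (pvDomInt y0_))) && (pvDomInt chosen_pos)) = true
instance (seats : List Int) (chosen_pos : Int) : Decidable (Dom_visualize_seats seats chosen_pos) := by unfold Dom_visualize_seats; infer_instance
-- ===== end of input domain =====

-- B renders all seats with one map/join and then patches the chosen position by slicing; objective: simpler.
-- ===== PORT A =====
-- result is a Python string built by +=; modelled as a List Char accumulator, wrapped by String.ofList at the end
def visualize_seats (seats : List Int) (chosen_pos : Int) : String :=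
  String.ofList ((PySem.List.enumerate seats).foldl
    (fun result p =>
      result ++ [if p.1 = chosen_pos then 'X' else if p.2 = 1 then 'P' else '_']) [])

-- ===== PORT B =====
def visualize_seats_alt (seats : List Int) (chosen_pos : Int) : String :=
  let base : List Char := seats.map (fun s => if s = 1 then 'P' else '_')
  if 0 ≤ chosen_pos ∧ chosen_pos < (seats.length : Int) then
    String.ofList (PySem.List.slice base none (some chosen_pos) ++ ['X'] ++
               PySem.List.slice base (some (chosen_pos + 1)) none)
  else
    String.ofList base

-- ===== PRECONDITION & SPEC =====
def Spec_visualize_seats (seats : List Int) (chosen_pos : Int) (out : String) : Prop := out = visualize_seats_alt seats chosen_pos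
instance (seats : List Int) (chosen_pos : Int) (out : String) : Decidable (Spec_visualize_seats seats chosen_pos out) := by unfold Spec_visualize_seats; infer_instance

-- ===== CLAIM (what is proved, stated in full; the proofs are below) =====
def Claim_equal_visualize_seats : Prop := ∀ (seats : List Int) (chosen_pos : Int), Dom_visualize_seats seats chosen_pos → Spec_visualize_seats seats chosen_pos (visualize_seats seats chosen_pos)

-- ===== LEMMAS AND PROOFS =====

lemma foldl_app_map {α β : Type} (g : α → β) (l : List α) (acc : List β) :
    l.foldl (fun r p => r ++ [g p]) acc = acc ++ l.map g := by
  induction l generalizing acc with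
  | nil => simp
  | cons x xs ih => simp [List.foldl, ih]

lemma chars_eq (seats : List Int) (chosen_pos : Int) :
    (PySem.List.enumerate seats).foldl
      (fun result p =>
        result ++ [if p.1 = chosen_pos then 'X' else if p.2 = 1 then 'P' else '_']) [] =
    (let base : List Char := seats.map (fun s => if s = 1 then 'P' else '_')
     if 0 ≤ chosen_pos ∧ chosen_pos < (seats.length : Int) then
       PySem.List.slice base none (some chosen_pos) ++ ['X'] ++
       PySem.List.slice base (some (chosen_pos + 1)) none
     else base) := by
  rw [foldl_app_map]
  simp only [List.nil_append]
  split
  · rename_i h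
    obtain ⟨h0, hlt⟩ := h
    obtain ⟨j, rfl⟩ := Int.eq_ofNat_of_zero_le h0
    have hj : j < seats.length := by exact_mod_cast hlt
    rw [PySem.List.slice_to_natCast, show ((j:Int) + 1) = ((j+1 : Nat) : Int) by push_cast; ring,
        PySem.List.slice_from_natCast]
    have hset : (seats.map (fun s => if s = 1 then 'P' else '_')).take j ++ 'X' ::
        (seats.map (fun s => if s = 1 then 'P' else '_')).drop (j+1) =
        (seats.map (fun s => if s = 1 then 'P' else '_')).set j 'X' := by
      rw [List.set_eq_take_append_cons_drop, if_pos (by simpa using hj)]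
    simp only [List.append_assoc, List.singleton_append, hset]
    apply List.ext_getElem
    · simp
    · intro k hk1 hk2
      simp only [List.getElem_map, PySem.List.getElem_enumerate, List.getElem_set] at *
      have hkl : k < seats.length := by simpa using hk1
      by_cases hkj : j = k
      · subst hkj; simp
      · have hne : (k : Int) ≠ (j : Int) := by omega
        simp [hne, hkj]
  · rename_i h
    apply List.ext_getElem
    · simp
    · intro k hk1 hk2
      have hkl : k < seats.length := by simpa using hk1
      have hne : (k : Int) ≠ chosen_pos := by
        rw [not_and_or] at h
        omega
      simp [PySem.List.getElem_enumerate, hne]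

-- ===== VERDICT =====
theorem visualize_seats_spec : Claim_equal_visualize_seats := by
  intro seats chosen_pos _
  unfold Spec_visualize_seats visualize_seats visualize_seats_alt
  rw [chars_eq]
  simp only []
  split <;> rfl
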